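-- pv_equiv track=rewrite | github.com/cleiveliu/code-archive | code-20191024/python/topcoder/Aaagmnrs.py | mark_it
-- ===== SOURCE A (Python) =====
-- from collections import Counter
--
-- def mark_it(word):
--     def remove_space(word):
--         return (c for c in word if c != ' ')
--     c = Counter(remove_space(word))
--     sorted_keys = sorted(c)
--     ret = ''
--     for key in sorted_keys:
--         ret += key
--         ret += str(c[key])
--     return ret
-- ===== SOURCE B (Python) =====
-- def mark_it(word):
--     # sort the space-free character multiset, then run-length encode it in one pass
--     chars = sorted(c for c in word if c != ' ')
--     out = []
--     prev = None
--     count = 0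
--     for ch in chars:
--         if ch == prev:
--             count += 1
--         else:
--             if prev is not None:
--                 out.append(prev + str(count))
--             prev, count = ch, 1
--     if prev is not None:
--         out.append(prev + str(count))
--     return ''.join(out)
-- ===== Notes on version B (the rewrite author's own statement) =====
-- stated objective: alternative
-- what changed: B sorts the space-free character multiset and run-length encodes consecutive runs in one pass, instead of building a Counter dict and iterating its sorted keys with dict lookups.
import Mathlib
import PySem

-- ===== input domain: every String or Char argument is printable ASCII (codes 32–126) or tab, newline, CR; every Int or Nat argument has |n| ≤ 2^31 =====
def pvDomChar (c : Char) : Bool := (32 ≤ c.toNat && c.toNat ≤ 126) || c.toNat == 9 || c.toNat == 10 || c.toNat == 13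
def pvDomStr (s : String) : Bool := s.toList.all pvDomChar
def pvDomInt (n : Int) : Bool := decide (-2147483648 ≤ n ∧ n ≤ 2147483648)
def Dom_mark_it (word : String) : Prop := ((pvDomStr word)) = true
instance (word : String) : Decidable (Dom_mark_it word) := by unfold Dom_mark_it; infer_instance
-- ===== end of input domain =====

-- B replaces A's Counter-then-sorted-keys loop by sorting the space-free character
-- multiset and run-length encoding it in a single pass (alternative decomposition).

-- ===== PORT A =====
def mark_it (word : String) : String :=
  let cs := word.toList.filter (fun c => c != ' ')
  let c := PySem.Dict.counter cs
  let sortedKeys := PySem.List.sorted c.keys (fun x => x) false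
  let ret := sortedKeys.foldl
    (fun ret key => ret ++ [key] ++ PySem.Int.toChars (c.getD key 0)) ([] : List Char)
  String.ofList ret

-- ===== PORT B =====
-- one step of Source B's run-length-encoding loop; state = (out, prev, count)
def pvStepB (s : List (List Char) × Option Char × Int) (ch : Char) :
    List (List Char) × Option Char × Int :=
  match s with
  | (out, prev, count) =>
    if some ch = prev then (out, prev, count + 1)
    else
      match prev with
      | some p => (out ++ [p :: PySem.Int.toChars count], some ch, 1)
      | none => (out, some ch, 1)

-- Source B's trailing flush 'if prev is not None: out.append(prev + str(count))'
def pvFinish (s : List (List Char) × Option Char × Int) : List (List Char) :=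
  match s.2.1 with
  | some p => s.1 ++ [p :: PySem.Int.toChars s.2.2]
  | none => s.1

def mark_it_alt (word : String) : String :=
  let chars := PySem.List.sorted (word.toList.filter (fun c => c != ' ')) (fun x => x) false
  let out := pvFinish (chars.foldl pvStepB ([], none, 0))
  String.ofList (PySem.Chars.join [] out)

-- ===== PRECONDITION & SPEC =====
def Spec_mark_it (word : String) (out : String) : Prop := out = mark_it_alt word
instance (word : String) (out : String) : Decidable (Spec_mark_it word out) := by
  unfold Spec_mark_it; infer_instance

-- ===== CLAIM (what is proved, stated in full; the proofs are below) =====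
def Claim_equal_mark_it : Prop := ∀ (word : String), Dom_mark_it word → Spec_mark_it word (mark_it word)

-- ===== LEMMAS AND PROOFS =====

theorem pv_join_nil (xss : List (List Char)) : PySem.Chars.join [] xss = xss.flatten := by
  induction xss with
  | nil => rfl
  | cons x xs ih =>
    cases xs with
    | nil => simp [PySem.Chars.join_singleton]
    | cons y ys =>
      rw [PySem.Chars.join_cons_cons, ih]
      simp

theorem pv_foldl_app (f : Char → List Char) (ks : List Char) (init : List Char) :
    ks.foldl (fun acc k => acc ++ [k] ++ f k) init = init ++ ks.flatMap (fun k => [k] ++ f k) := by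
  induction ks generalizing init with
  | nil => simp
  | cons k ks ih => simp [List.foldl, List.flatMap]

theorem pv_run (m : Nat) (out : List (List Char)) (k : Char) (c : Int) :
    List.foldl pvStepB (out, some k, c) (List.replicate m k) = (out, some k, c + m) := by
  induction m generalizing c with
  | zero => simp
  | succ n ih =>
    rw [List.replicate_succ, List.foldl_cons]
    show List.foldl pvStepB (if some k = some k then (out, some k, c + 1) else _) _ = _
    rw [if_pos rfl, ih]
    congr 1
    push_cast; ring_nf

theorem pv_rle (cnt : Char → Nat) (ks : List Char)
    (hks : ks.Pairwise (· < ·)) (hc : ∀ k ∈ ks, 0 < cnt k)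
    (st : List (List Char) × Option Char × Int)
    (hok : ∀ k ∈ ks, ∀ p, st.2.1 = some p → p < k) :
    pvFinish (List.foldl pvStepB st (ks.flatMap (fun k => List.replicate (cnt k) k))) =
      pvFinish st ++ ks.map (fun k => k :: PySem.Int.toChars (cnt k)) := by
  induction ks generalizing st with
  | nil => simp
  | cons k ks ih =>
    obtain ⟨out, prev, c⟩ := st
    have hck := hc k (by simp)
    have hrep : List.replicate (cnt k) k = k :: List.replicate (cnt k - 1) k := by
      cases h : cnt k with
      | zero => omega
      | succ n => simp [List.replicate_succ]
    rw [List.flatMap_cons, hrep, List.foldl_append, List.foldl_cons]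
    have hstep : pvStepB (out, prev, c) k = (pvFinish (out, prev, c), some k, 1) := by
      cases prev with
      | none => simp [pvStepB, pvFinish]
      | some p =>
        have hpk : p < k := hok k (by simp) p rfl
        have : some k ≠ some p := by simp; exact fun h => absurd h (ne_of_gt hpk)
        simp [pvStepB, this, pvFinish]
    rw [hstep, pv_run]
    have hcount : (1 : Int) + (cnt k - 1 : Nat) = (cnt k : Int) := by
      push_cast [Nat.cast_sub (by omega : 1 ≤ cnt k)]; ring
    rw [hcount]
    rw [ih (hks.of_cons) (fun k' hk' => hc k' (List.mem_cons_of_mem _ hk'))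
        _ (by
          intro k' hk' p hp
          simp at hp
          subst hp
          exact (List.pairwise_cons.mp hks).1 k' hk')]
    simp [pvFinish]

theorem pv_count_flatMap_rep (cs : List Char) (ks : List Char) (hnd : ks.Nodup) (v : Char) :
    (ks.flatMap (fun k => List.replicate (cs.count k) k)).count v
      = if v ∈ ks then cs.count v else 0 := by
  induction ks with
  | nil => simp
  | cons k ks ih =>
    rw [List.flatMap_cons, List.count_append, ih hnd.of_cons]
    by_cases hv : v = k
    · subst hv
      have : v ∉ ks := (List.nodup_cons.mp hnd).1
      simp [this]
    · simp [List.count_replicate, hv, List.mem_cons, Ne.symm hv]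

theorem pv_perm_flatMap_rep (cs ks : List Char) (hnd : ks.Nodup)
    (hmem : ∀ v, v ∈ ks ↔ v ∈ cs) :
    (ks.flatMap (fun k => List.replicate (cs.count k) k)).Perm cs := by
  rw [List.perm_iff_count]
  intro v
  rw [pv_count_flatMap_rep cs ks hnd v]
  by_cases hv : v ∈ cs
  · simp [(hmem v).mpr hv]
  · have h1 : v ∉ ks := fun h => hv ((hmem v).mp h)
    simp [h1, List.count_eq_zero.mpr hv]

theorem pv_pairwise_flatMap_rep (cs ks : List Char) (hks : ks.Pairwise (· < ·)) :
    (ks.flatMap (fun k => List.replicate (cs.count k) k)).Pairwise (· ≤ ·) := by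
  induction ks with
  | nil => simp
  | cons k ks ih =>
    rw [List.flatMap_cons, List.pairwise_append]
    refine ⟨?_, ih hks.of_cons, ?_⟩
    · apply List.pairwise_replicate.mpr
      simp
    · intro a ha b hb
      have hak : a = k := List.eq_of_mem_replicate ha
      obtain ⟨k', hk', hb'⟩ := List.mem_flatMap.mp hb
      have hbk : b = k' := List.eq_of_mem_replicate hb'
      rw [hak, hbk]
      exact le_of_lt ((List.pairwise_cons.mp hks).1 k' hk')

-- ===== VERDICT (by name: the statement is the Claim_ definition above) =====
theorem mark_it_spec : Claim_equal_mark_it := by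
  intro word _
  unfold Spec_mark_it mark_it mark_it_alt
  set cs := word.toList.filter (fun c => c != ' ') with hcs
  set ks := PySem.List.sorted (PySem.Set.ofList cs) (fun x => x) false with hks
  have hlt : ks.Pairwise (· < ·) := PySem.List.sorted_ofList_pairwise_lt cs
  have hnd : ks.Nodup := hlt.nodup
  have hmem : ∀ v, v ∈ ks ↔ v ∈ cs := by
    intro v
    rw [hks, PySem.List.mem_sorted, PySem.Set.mem_ofList]
  have hdecomp : PySem.List.sorted cs (fun x => x) false
      = ks.flatMap (fun k => List.replicate (cs.count k) k) :=
    PySem.List.sorted_id_eq_of_perm_of_pairwise cs _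
      (pv_perm_flatMap_rep cs ks hnd hmem) (pv_pairwise_flatMap_rep cs ks hlt)
  simp only [PySem.Dict.keys_counter, PySem.Dict.getD_counter, ← hks]
  rw [pv_foldl_app, hdecomp,
      pv_rle (fun k => cs.count k) ks hlt
        (fun k hk => List.count_pos_iff.mpr ((hmem k).mp hk))
        ([], none, 0) (by intro k _ p hp; simp at hp),
      pv_join_nil]
  simp [List.flatMap, pvFinish]
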